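-- pv_equiv track=rewrite | github.com/fifosk/ebook-tools | modules/services/youtube_dubbing/nas.py | _summarize_ffmpeg_error
-- ===== SOURCE A (Python) =====
-- def _summarize_ffmpeg_error(stderr: str) -> str:
--     """Return a compact error string instead of the full ffmpeg banner."""
--
--     if not stderr:
--         return "ffmpeg failed"
--     lines = [line.strip() for line in stderr.splitlines() if line.strip()]
--     # Drop leading banner/configuration noise.
--     while lines and lines[0].lower().startswith("ffmpeg version"):
--         lines.pop(0)
--     # Prefer the last line that looks like an error message.
--     for line in reversed(lines):
--         lower = line.lower()
--         if "error" in lower or "invalid" in lower or "unsupported" in lower: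
--             return line
--     # Fall back to the final line to keep the response concise.
--     return lines[-1] if lines else "ffmpeg failed"
-- ===== SOURCE B (Python) =====
-- def _summarize_ffmpeg_error(stderr: str) -> str:
--     """Return a compact error string instead of the full ffmpeg banner."""
--
--     if not stderr:
--         return "ffmpeg failed"
--     skipping = True
--     last_line = None
--     last_error = None
--     for raw in stderr.splitlines():
--         line = raw.strip()
--         if not line:
--             continue
--         if skipping and line.lower().startswith("ffmpeg version"):
--             continue
--         skipping = False
--         last_line = line
--         lower = line.lower()
--         if "error" in lower or "invalid" in lower or "unsupported" in lower:
--             last_error = line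
--     if last_error is not None:
--         return last_error
--     if last_line is not None:
--         return last_line
--     return "ffmpeg failed"
-- ===== Notes on version B (the rewrite author's own statement) =====
-- stated objective: simpler
-- what changed: Replaced A's materialised list comprehension, destructive banner-popping while loop and reverse scan with a single forward pass over the raw lines that keeps a banner-skipping flag plus the last line and last error-looking line seen.
import Mathlib
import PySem

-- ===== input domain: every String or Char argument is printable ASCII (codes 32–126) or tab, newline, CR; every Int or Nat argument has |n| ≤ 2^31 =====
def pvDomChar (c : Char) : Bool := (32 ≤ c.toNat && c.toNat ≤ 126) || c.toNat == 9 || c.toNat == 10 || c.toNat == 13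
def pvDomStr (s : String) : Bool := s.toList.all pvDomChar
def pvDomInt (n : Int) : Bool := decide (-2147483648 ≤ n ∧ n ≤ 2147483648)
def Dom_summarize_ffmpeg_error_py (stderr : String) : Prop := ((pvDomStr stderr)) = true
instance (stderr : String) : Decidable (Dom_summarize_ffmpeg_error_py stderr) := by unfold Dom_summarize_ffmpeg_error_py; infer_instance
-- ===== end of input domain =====

-- B replaces A's build-list / pop-banner / reverse-scan with one forward pass over the lines
-- keeping (skipping, last_line, last_error); objective: simpler (single pass, no list materialised).

-- ===== PORT A =====

-- "error"/"invalid"/"unsupported" in line.lower()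
def pvIsErr (line : String) : Bool :=
  let lower := PySem.Str.lower line
  PySem.Str.isIn "error" lower || PySem.Str.isIn "invalid" lower || PySem.Str.isIn "unsupported" lower

-- while lines and lines[0].lower().startswith("ffmpeg version"): lines.pop(0)
def pvBannerDrop : List String → List String
  | [] => []
  | l :: rest =>
      if PySem.Str.startswith (PySem.Str.lower l) "ffmpeg version" then pvBannerDrop rest
      else l :: rest

def summarize_ffmpeg_error_py (stderr : String) : String :=
  if stderr = "" then "ffmpeg failed"
  else
    let lines := ((PySem.Str.splitlines stderr).filter
        (fun line => PySem.Str.strip line ≠ "")).map PySem.Str.strip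
    let lines := pvBannerDrop lines
    match lines.reverse.find? pvIsErr with
    | some line => line
    | none => if lines ≠ [] then (PySem.List.pyGet? lines (-1)).getD "ffmpeg failed" else "ffmpeg failed"

-- ===== PORT B =====

-- one loop iteration of B: strip, skip blanks, skip leading banner, track last line / last error
def pvStepB (st : Bool × Option String × Option String) (raw : String) :
    Bool × Option String × Option String :=
  let line := PySem.Str.strip raw
  if line = "" then st
  else if st.1 && PySem.Str.startswith (PySem.Str.lower line) "ffmpeg version" then st
  else (false, some line, if pvIsErr line then some line else st.2.2)

def summarize_ffmpeg_error_py_alt (stderr : String) : String :=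
  if stderr = "" then "ffmpeg failed"
  else
    let st := (PySem.Str.splitlines stderr).foldl pvStepB (true, none, none)
    match st.2.1, st.2.2 with
    | _, some e => e
    | some l, none => l
    | none, none => "ffmpeg failed"

-- ===== PRECONDITION & SPEC =====
def Spec_summarize_ffmpeg_error_py (stderr : String) (out : String) : Prop := out = summarize_ffmpeg_error_py_alt stderr
instance (stderr : String) (out : String) : Decidable (Spec_summarize_ffmpeg_error_py stderr out) := by unfold Spec_summarize_ffmpeg_error_py; infer_instance

-- ===== CLAIM (what is proved, stated in full; the proofs are below) =====
def Claim_equal_summarize_ffmpeg_error_py : Prop := ∀ (stderr : String), Dom_summarize_ffmpeg_error_py stderr → Spec_summarize_ffmpeg_error_py stderr (summarize_ffmpeg_error_py stderr)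

-- ===== LEMMAS AND PROOFS =====

-- B's step on an already-stripped nonempty line
def pvStepCore (st : Bool × Option String × Option String) (line : String) :
    Bool × Option String × Option String :=
  if st.1 && PySem.Str.startswith (PySem.Str.lower line) "ffmpeg version" then st
  else (false, some line, if pvIsErr line then some line else st.2.2)

theorem pvFoldB_eq_foldCore (raws : List String) (st : Bool × Option String × Option String) :
    raws.foldl pvStepB st =
      (((raws.filter (fun l => PySem.Str.strip l ≠ "")).map PySem.Str.strip)).foldl pvStepCore st := by
  induction raws generalizing st with
  | nil => rfl
  | cons a raws ih =>
      by_cases h : PySem.Str.strip a = "" <;>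
        simp [List.foldl, pvStepB, pvStepCore, h, ih]

theorem pvFoldCore_banner (L : List String) (ll le : Option String) :
    (L.foldl pvStepCore (true, ll, le)).2 = ((pvBannerDrop L).foldl pvStepCore (false, ll, le)).2 := by
  induction L generalizing ll le with
  | nil => rfl
  | cons a L ih =>
      by_cases h : PySem.Chars.startswith (PySem.Chars.lower a.toList)
          ['f','f','m','p','e','g',' ','v','e','r','s','i','o','n'] = true
      · rw [List.foldl_cons,
            show pvStepCore (true, ll, le) a = (true, ll, le) by simp [pvStepCore, h],
            show pvBannerDrop (a :: L) = pvBannerDrop L by simp [pvBannerDrop, h]]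
        exact ih ll le
      · rw [show pvBannerDrop (a :: L) = a :: L by simp [pvBannerDrop, h],
            List.foldl_cons, List.foldl_cons,
            show pvStepCore (true, ll, le) a
                = (false, some a, if pvIsErr a = true then some a else le) by simp [pvStepCore, h],
            show pvStepCore (false, ll, le) a
                = (false, some a, if pvIsErr a = true then some a else le) by simp [pvStepCore]]

theorem pvFoldCore_false (L : List String) (ll le : Option String) :
    L.foldl pvStepCore (false, ll, le) =
      (false, L.getLast?.or ll, (L.reverse.find? pvIsErr).or le) := by
  induction L generalizing ll le with
  | nil => rfl
  | cons a L ih =>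
      rw [List.foldl_cons,
          show pvStepCore (false, ll, le) a
              = (false, some a, if pvIsErr a = true then some a else le) by simp [pvStepCore],
          ih]
      have hlast : L.getLast?.or (some a) = (a :: L).getLast?.or ll := by
        cases L with
        | nil => simp
        | cons b t =>
            cases hbt : (b :: t).getLast? with
            | none => simp at hbt
            | some x => simp [List.getLast?_cons_cons, hbt, Option.or]
      have hfind : (L.reverse.find? pvIsErr).or (if pvIsErr a = true then some a else le)
          = ((a :: L).reverse.find? pvIsErr).or le := by
        rw [List.reverse_cons, List.find?_append]
        cases L.reverse.find? pvIsErr <;> by_cases he : pvIsErr a = true <;>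
          simp [List.find?, he, Option.or]
      rw [hlast, hfind]

-- ===== VERDICT (by name: the statement is the Claim_ definition above) =====
theorem summarize_ffmpeg_error_py_spec : Claim_equal_summarize_ffmpeg_error_py := by
  intro stderr _
  unfold Spec_summarize_ffmpeg_error_py summarize_ffmpeg_error_py summarize_ffmpeg_error_py_alt
  by_cases hs : stderr = ""
  · simp [hs]
  · simp only [if_neg hs]
    rw [pvFoldB_eq_foldCore]
    set raws := ((PySem.Str.splitlines stderr).filter
        (fun line => PySem.Str.strip line ≠ "")).map PySem.Str.strip with hraws
    clear_value raws
    have h2 := pvFoldCore_banner raws none none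
    rw [pvFoldCore_false] at h2
    rw [h2]
    set L := pvBannerDrop raws with hL
    clear_value L
    cases hf : L.reverse.find? pvIsErr with
    | some e => simp [Option.or]
    | none =>
        cases hl : L.getLast? with
        | none =>
            have hnil : L = [] := by cases L with | nil => rfl | cons b t => simp at hl
            subst hnil
            simp [Option.or]
        | some l =>
            have hne : L ≠ [] := by rintro rfl; simp at hl
            simp [Option.or, hl, hne, PySem.List.pyGet?_neg_one]
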